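-- pv_equiv track=rewrite | github.com/treangenlab/Olivar | src/olivar/basic.py | get_degenerate_base
-- ===== SOURCE A (Python) =====
-- degenerate_bases = {
--         frozenset(['A', 'C']): 'M',
--         frozenset(['A', 'G']): 'R',
--         frozenset(['A', 'T']): 'W',
--         frozenset(['C', 'G']): 'S',
--         frozenset(['C', 'T']): 'Y',
--         frozenset(['G', 'T']): 'K',
--         frozenset(['A', 'C', 'G']): 'V',
--         frozenset(['A', 'C', 'T']): 'H',
--         frozenset(['A', 'G', 'T']): 'D',
--         frozenset(['C', 'G', 'T']): 'B',
--         frozenset(['A', 'C', 'G', 'T']): 'N',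
--
--         frozenset(['a', 'c']): 'm',
--         frozenset(['a', 'g']): 'r',
--         frozenset(['a', 't']): 'w',
--         frozenset(['c', 'g']): 's',
--         frozenset(['c', 't']): 'y',
--         frozenset(['g', 't']): 'k',
--         frozenset(['a', 'c', 'g']): 'v',
--         frozenset(['a', 'c', 't']): 'h',
--         frozenset(['a', 'g', 't']): 'd',
--         frozenset(['c', 'g', 't']): 'b',
--         frozenset(['a', 'c', 'g', 't']): 'n'
-- }
--
-- def get_degenerate_base(bases):
--     """Return the IUPAC degenerate base code for a set of nucleotides"""
--     if isinstance(bases, str):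
--         unique_bases = set(bases)
--     else:
--         unique_bases = {b for b in bases}
--
--     if len(unique_bases) == 1:
--         return unique_bases.pop()
--
--     return degenerate_bases.get(frozenset(unique_bases), 'N')
-- ===== SOURCE B (Python) =====
-- def get_degenerate_base(bases):
--     """Return the IUPAC degenerate base code for a set of nucleotides"""
--     if isinstance(bases, str):
--         unique_bases = set(bases)
--     else:
--         unique_bases = {b for b in bases}
--
--     if len(unique_bases) == 1:
--         return unique_bases.pop()
--
--     # bitmask A=1, C=2, G=4, T=8 into a fixed 16-char table
--     for alphabet, table in (('ACGT', 'NNNMNRSVNWYHKDBN'),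
--                             ('acgt', 'nnnmnrsvnwyhkdbn')):
--         mask = 0
--         for b in unique_bases:
--             i = alphabet.find(b)
--             if i < 0:
--                 break
--             mask |= 1 << i
--         else:
--             return table[mask]
--     return 'N'
-- ===== Notes on version B (the rewrite author's own statement) =====
-- stated objective: alternative
-- what changed: The frozenset-keyed dictionary lookup of A is replaced by OR-ing one bit per base (A=1,C=2,G=4,T=8, per upper/lower alphabet) and indexing a fixed 16-character code table with the mask.
import Mathlib
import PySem

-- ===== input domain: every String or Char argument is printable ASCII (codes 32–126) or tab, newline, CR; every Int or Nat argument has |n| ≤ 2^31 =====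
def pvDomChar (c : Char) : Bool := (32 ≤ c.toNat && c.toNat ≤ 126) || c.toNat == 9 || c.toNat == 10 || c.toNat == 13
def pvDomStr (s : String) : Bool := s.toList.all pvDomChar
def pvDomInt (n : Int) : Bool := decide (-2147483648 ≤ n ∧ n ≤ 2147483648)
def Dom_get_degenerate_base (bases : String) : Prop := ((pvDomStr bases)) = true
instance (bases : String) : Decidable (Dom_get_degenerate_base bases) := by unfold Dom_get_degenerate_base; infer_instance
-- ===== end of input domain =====

-- B replaces A's frozenset-keyed dictionary lookup with a bitmask (A=1,C=2,G=4,T=8) indexing a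
-- fixed 16-character table, tried per alphabet case; objective: idiomatic/alternative, same cost.

-- ===== PORT A =====
-- the module-level dict 'degenerate_bases' (frozenset keys → IUPAC code)
def degenTable : List (PySem.Set Char × String) :=
  [ (PySem.Set.ofList ['A','C'], "M"), (PySem.Set.ofList ['A','G'], "R"),
    (PySem.Set.ofList ['A','T'], "W"), (PySem.Set.ofList ['C','G'], "S"),
    (PySem.Set.ofList ['C','T'], "Y"), (PySem.Set.ofList ['G','T'], "K"),
    (PySem.Set.ofList ['A','C','G'], "V"), (PySem.Set.ofList ['A','C','T'], "H"),
    (PySem.Set.ofList ['A','G','T'], "D"), (PySem.Set.ofList ['C','G','T'], "B"),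
    (PySem.Set.ofList ['A','C','G','T'], "N"),
    (PySem.Set.ofList ['a','c'], "m"), (PySem.Set.ofList ['a','g'], "r"),
    (PySem.Set.ofList ['a','t'], "w"), (PySem.Set.ofList ['c','g'], "s"),
    (PySem.Set.ofList ['c','t'], "y"), (PySem.Set.ofList ['g','t'], "k"),
    (PySem.Set.ofList ['a','c','g'], "v"), (PySem.Set.ofList ['a','c','t'], "h"),
    (PySem.Set.ofList ['a','g','t'], "d"), (PySem.Set.ofList ['c','g','t'], "b"),
    (PySem.Set.ofList ['a','c','g','t'], "n") ]

-- degenerate_bases.get(frozenset(u), 'N'): dict lookup = first key equal AS A SET, default 'N'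
def degenLookup (u : PySem.Set Char) : String :=
  match degenTable.find? (fun p => PySem.Set.equal p.1 u) with
  | some p => p.2
  | none => "N"

def get_degenerate_base (bases : String) : String :=
  let u : PySem.Set Char := PySem.Set.ofList bases.toList
  if PySem.Set.len u = 1 then
    String.ofList u   -- unique_bases.pop() on a one-element set returns its single element
  else
    degenLookup u

-- ===== PORT B =====
-- the inner 'for b in unique_bases' loop: OR the bit of each base, none = break (base not found)
def bMask (al : List Char) : List Char → Nat → Option Nat
  | [], mask => some mask
  | b :: rest, mask =>
    let i := PySem.Chars.find al [b]
    if i < 0 then none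
    else bMask al rest (mask ||| (1 <<< i.toNat))

-- the 'for alphabet, table in (…)' loop, unrolled over its two iterations
def bTry (u : PySem.Set Char) : String :=
  match bMask "ACGT".toList u 0 with
  | some m => String.ofList [("NNNMNRSVNWYHKDBN".toList).getD m 'N']  -- table[mask]; mask < 16 always
  | none =>
    match bMask "acgt".toList u 0 with
    | some m => String.ofList [("nnnmnrsvnwyhkdbn".toList).getD m 'N']
    | none => "N"

def get_degenerate_base_alt (bases : String) : String :=
  let u : PySem.Set Char := PySem.Set.ofList bases.toList
  if PySem.Set.len u = 1 then
    String.ofList u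
  else
    bTry u

-- ===== PRECONDITION & SPEC =====
def Spec_get_degenerate_base (bases : String) (out : String) : Prop := out = get_degenerate_base_alt bases
instance (bases : String) (out : String) : Decidable (Spec_get_degenerate_base bases out) := by unfold Spec_get_degenerate_base; infer_instance

-- ===== CLAIM (what is proved, stated in full; the proofs are below) =====
def Claim_equal_get_degenerate_base : Prop := ∀ (bases : String), Dom_get_degenerate_base bases → Spec_get_degenerate_base bases (get_degenerate_base bases)

-- ===== LEMMAS AND PROOFS =====

-- B's mask loop is invariant under permutation of the (distinct) bases
theorem bMask_perm (al : List Char) {u v : List Char} (hp : u.Perm v) :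
    ∀ m, bMask al u m = bMask al v m := by
  induction hp with
  | nil => intro m; rfl
  | cons x _ ih =>
      intro m
      simp only [bMask]
      split
      · rfl
      · exact ih _
  | swap x y l =>
      intro m
      simp only [bMask]
      split_ifs <;> try rfl
      rw [Nat.or_right_comm]
  | trans _ _ ih1 ih2 => intro m; rw [ih1, ih2]

-- the mask loop breaks (returns none) as soon as some base is outside the alphabet
theorem bMask_none (al : List Char) {u : List Char} {x : Char}
    (hx : x ∈ u) (hxal : x ∉ al) : ∀ m, bMask al u m = none := by
  induction u with
  | nil => cases hx
  | cons b rest ih =>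
      intro m
      simp only [bMask]
      split
      · rfl
      · rename_i hfind
        rcases List.mem_cons.mp hx with heq | hx'
        · exfalso
          apply hfind
          have h1 : PySem.Chars.find al [b] = -1 := by
            rw [PySem.Chars.find_eq_neg_one_iff, List.singleton_infix_iff, ← heq]
            exact hxal
          omega
        · exact ih hx' _

theorem equal_false_of_witness {s u : List Char} {x : Char}
    (hx : x ∈ u) (hxs : x ∉ s) : PySem.Set.equal s u = false := by
  simp only [PySem.Set.equal, Bool.and_eq_false_iff]
  right
  simp only [PySem.Set.issubset, PySem.Set.contains, List.all_eq_false]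
  exact ⟨x, hx, by simp [List.contains_eq_mem, hxs]⟩

theorem equal_perm {u v : List Char} (s : PySem.Set Char) (hp : u.Perm v) :
    PySem.Set.equal s u = PySem.Set.equal s v := by
  rw [Bool.eq_iff_iff]
  simp only [PySem.Set.equal, PySem.Set.issubset, PySem.Set.contains,
    List.contains_eq_mem, List.all_eq_true, Bool.and_eq_true, decide_eq_true_eq]
  constructor
  · rintro ⟨h1, h2⟩
    exact ⟨fun x hx => hp.mem_iff.mp (h1 x hx), fun x hx => h2 x (hp.mem_iff.mpr hx)⟩
  · rintro ⟨h1, h2⟩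
    exact ⟨fun x hx => hp.mem_iff.mpr (h1 x hx), fun x hx => h2 x (hp.mem_iff.mp hx)⟩

theorem find?_congr' {α : Type} {f g : α → Bool} : ∀ (l : List α),
    (∀ x ∈ l, f x = g x) → l.find? f = l.find? g := by
  intro l h
  induction l with
  | nil => rfl
  | cons a l ih =>
    simp only [List.find?]
    rw [h a (by simp)]
    split
    · rfl
    · exact ih (fun x hx => h x (by simp [hx]))

theorem lookup_perm {u v : List Char} (hp : u.Perm v) : degenLookup u = degenLookup v := by
  unfold degenLookup
  rw [find?_congr' degenTable (fun p _ => equal_perm p.1 hp)]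

theorem bTry_perm {u v : List Char} (hp : u.Perm v) : bTry u = bTry v := by
  unfold bTry
  rw [bMask_perm _ hp 0, bMask_perm _ hp 0]

-- if u has a base outside ACGT and one outside acgt, no dict key matches
theorem lookup_eq_N {u : List Char} {x y : Char}
    (hx : x ∈ u) (hxu : x ∉ ("ACGT".toList)) (hy : y ∈ u) (hyu : y ∉ ("acgt".toList)) :
    degenLookup u = "N" := by
  unfold degenLookup
  have hnone : degenTable.find? (fun p => PySem.Set.equal p.1 u) = none := by
    rw [List.find?_eq_none]
    intro p hp
    simp only [degenTable, List.mem_cons, List.not_mem_nil, or_false] at hp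
    rcases hp with rfl|rfl|rfl|rfl|rfl|rfl|rfl|rfl|rfl|rfl|rfl|rfl|rfl|rfl|rfl|rfl|rfl|rfl|rfl|rfl|rfl|rfl <;>
      simp only [Bool.not_eq_true] <;>
      first
        | (refine equal_false_of_witness hx ?_
           intro h
           rw [PySem.Set.mem_ofList] at h
           apply hxu
           fin_cases h <;> decide)
        | (refine equal_false_of_witness hy ?_
           intro h
           rw [PySem.Set.mem_ofList] at h
           apply hyu
           fin_cases h <;> decide)
  rw [hnone]

theorem perm_canonical {u al : List Char} (hn : u.Nodup) (hal : al.Nodup)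
    (hU : ∀ x ∈ u, x ∈ al) : u.Perm (al.filter (fun x => x ∈ u)) := by
  rw [List.perm_ext_iff_of_nodup hn (hal.filter _)]
  intro a
  simp only [List.mem_filter, decide_eq_true_eq]
  constructor
  · intro h; exact ⟨hU a h, h⟩
  · intro h; exact h.2

-- the multi-base case: dict lookup = bitmask table indexing
theorem main_eq (u : List Char) (hn : u.Nodup) (hlen : 2 ≤ u.length) :
    degenLookup u = bTry u := by
  by_cases hU : ∀ x ∈ u, x ∈ (['A','C','G','T'] : List Char)
  · have hp := perm_canonical hn (by decide) hU
    by_cases hA : 'A' ∈ u <;> by_cases hC : 'C' ∈ u <;>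
      by_cases hG : 'G' ∈ u <;> by_cases hT : 'T' ∈ u <;>
      simp only [List.filter, hA, hC, hG, hT, decide_true, decide_false] at hp <;>
      · rw [lookup_perm hp, bTry_perm hp]; decide
  · push Not at hU
    obtain ⟨x, hx, hxA⟩ := hU
    by_cases hL : ∀ x ∈ u, x ∈ (['a','c','g','t'] : List Char)
    · have hp := perm_canonical hn (by decide) hL
      by_cases hA : 'a' ∈ u <;> by_cases hC : 'c' ∈ u <;>
        by_cases hG : 'g' ∈ u <;> by_cases hT : 't' ∈ u <;>
        simp only [List.filter, hA, hC, hG, hT, decide_true, decide_false] at hp <;>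
        first
          | (rw [lookup_perm hp, bTry_perm hp]; decide)
          | (exfalso; have hl := hp.length_eq
             simp only [List.length_cons, List.length_nil] at hl; omega)
    · push Not at hL
      obtain ⟨y, hy, hyA⟩ := hL
      rw [lookup_eq_N hx hxA hy hyA]
      unfold bTry
      rw [bMask_none "ACGT".toList hx (by exact hxA) 0,
          bMask_none "acgt".toList hy (by exact hyA) 0]

theorem core_eq (u : List Char) (hn : u.Nodup) :
    (if PySem.Set.len u = 1 then String.ofList u else degenLookup u)
      = (if PySem.Set.len u = 1 then String.ofList u else bTry u) := by
  match u, hn with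
  | [], _ => decide
  | [c], _ => simp [PySem.Set.len]
  | c₁ :: c₂ :: rest, hn =>
      have h1 : ¬ (PySem.Set.len (c₁ :: c₂ :: rest) = 1) := by
        simp only [PySem.Set.len, List.length_cons]
        omega
      rw [if_neg h1, if_neg h1]
      exact main_eq _ hn (by simp)

-- ===== VERDICT (by name: the statement is the Claim_ definition above) =====
theorem get_degenerate_base_spec : Claim_equal_get_degenerate_base := by
  intro bases _
  unfold Spec_get_degenerate_base get_degenerate_base get_degenerate_base_alt
  exact core_eq _ (PySem.Set.nodup_ofList _)
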